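-- pv_equiv track=rewrite | github.com/Nelu251/LFPC | Lab3.py | delete_inaccesible
-- ===== SOURCE A (Python) =====
-- from copy import deepcopy
--
-- def delete_inaccesible(derivations):
--     start = list(derivations.keys())[0]
--     accesible = [start]
--
--     for letter in accesible:
--         for v in derivations[letter]:
--             for n in derivations.keys():
--                 if n in v and n not in accesible:
--                     accesible.append(n)
--     derivationsClone = deepcopy(derivations)
--     for key in derivationsClone.keys():
--         if key not in accesible:
--             del derivations[key]
--     return derivations
-- ===== SOURCE B (Python) =====
-- def delete_inaccesible(derivations):
--     keys = list(derivations)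
--     # Stage 1: build the substring-occurrence graph once, so the substring
--     # tests are done once per (key, key) pair instead of once per visit.
--     adj = {x: [n for n in keys if any(n in v for v in derivations[x])] for x in keys}
--     # Stage 2: naive fixpoint saturation over the precomputed graph: full
--     # passes over all keys until a pass adds nothing (no worklist/frontier).
--     reachable = {keys[0]}
--     changed = True
--     while changed:
--         changed = False
--         for x in keys:
--             if x in reachable:
--                 new = [n for n in adj[x] if n not in reachable]
--                 if new:
--                     reachable.update(new)
--                     changed = True
--     # Like A, delete the unreachable keys from the argument dict in place.
--     for key in keys:
--         if key not in reachable: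
--             del derivations[key]
--     return derivations
-- ===== Notes on version B (the rewrite author's own statement) =====
-- stated objective: alternative
-- what changed: Instead of A's growing-list worklist with substring tests and an O(R) membership scan inside the innermost loop, B first materialises the substring-occurrence graph as an adjacency dict (each key-in-production test done once) and then computes the reachable set by naive fixpoint saturation - repeated full passes over all keys into an O(1)-membership set until a pass adds nothing - with no worklist and no deepcopy; like A it deletes unreachable keys from the argument dict in place.
-- outside the precondition, e.g. on delete_inaccesible({}): A raises IndexError, B raises IndexError
import Mathlib
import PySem

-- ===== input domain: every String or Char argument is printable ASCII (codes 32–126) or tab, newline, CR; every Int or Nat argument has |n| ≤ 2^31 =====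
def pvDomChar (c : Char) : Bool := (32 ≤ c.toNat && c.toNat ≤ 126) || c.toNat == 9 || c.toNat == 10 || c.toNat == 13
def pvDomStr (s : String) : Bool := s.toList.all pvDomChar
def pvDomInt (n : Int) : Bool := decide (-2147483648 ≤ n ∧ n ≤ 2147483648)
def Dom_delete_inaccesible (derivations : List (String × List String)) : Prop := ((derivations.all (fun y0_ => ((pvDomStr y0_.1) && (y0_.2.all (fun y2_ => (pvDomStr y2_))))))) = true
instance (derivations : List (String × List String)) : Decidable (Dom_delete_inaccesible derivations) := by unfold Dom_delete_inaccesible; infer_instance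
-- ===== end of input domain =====

-- B replaces A's growing-list worklist (substring tests and an O(|accesible|) list scan inside the
-- innermost loop, plus a deepcopy) by two stages: it materialises the substring-occurrence graph as
-- an adjacency dict once, then saturates the reachable set by full passes over all keys until a pass
-- adds nothing. Both Pythons delete the unreachable keys from the argument dict IN PLACE and return
-- it — the theorems below are about the return value.

-- ===== PORT A =====
-- The Python callee receives dict(derivations): keys/lookups go through the PySem.Dict view.
def pvKeys (d : List (String × List String)) : List String := (PySem.Dict.ofList d).keys

-- derivations[letter]; in both programs the key looked up is always present, so getD is exact here
def pvProds (d : List (String × List String)) (x : String) : List String :=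
  (PySem.Dict.ofList d).getD x []

-- innermost loop of A: for n in derivations.keys(): if n in v and n not in accesible: accesible.append(n)
def pvA_keyScan (ks : List String) (v : String) (acc : List String) : List String :=
  ks.foldl (fun acc n => if PySem.Str.isIn n v && !acc.contains n then acc ++ [n] else acc) acc

-- middle loop of A: for v in derivations[letter]
def pvA_prodScan (ks : List String) (vs : List String) (acc : List String) : List String :=
  vs.foldl (fun acc v => pvA_keyScan ks v acc) acc

-- ---- termination machinery (cited by the loops' decreasing_by) ----
-- number of keys not yet collected
def pvF (ks acc : List String) : Nat := (ks.filter (fun k => !acc.contains k)).length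

-- the fresh elements a conditional-append pass over ks adds to acc
def pvNew (ks : List String) (p : String → Bool) (acc : List String) : List String :=
  (PySem.Set.ofList (ks.filter p)).filter (fun y => !acc.contains y)

lemma pvNew_nodup (ks : List String) (p : String → Bool) (acc : List String) :
    (pvNew ks p acc).Nodup := by
  exact (PySem.Set.nodup_ofList _).filter _

lemma pvNew_mem' {ks : List String} {p : String → Bool} {acc : List String} {x : String}
    (hx : x ∈ pvNew ks p acc) : x ∈ ks ∧ p x = true ∧ x ∉ acc := by
  unfold pvNew at hx
  simp only [List.mem_filter, PySem.Set.mem_ofList] at hx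
  refine ⟨hx.1.1, hx.1.2, ?_⟩
  simpa using hx.2

-- adding fresh (nodup, ∈ ks, ∉ acc) elements drops the count by at least their number
lemma pvF_append (ks acc fr : List String) (hnd : fr.Nodup)
    (hks : ∀ x ∈ fr, x ∈ ks) (hacc : ∀ x ∈ fr, x ∉ acc) :
    pvF ks (acc ++ fr) + fr.length ≤ pvF ks acc := by
  unfold pvF
  have hsub : List.Subperm fr ((ks.filter (fun k => !acc.contains k)).filter (fun k => fr.contains k)) := by
    refine List.subperm_of_subset hnd ?_
    intro x hx
    simp only [List.mem_filter]
    exact ⟨⟨hks x hx, by simpa using hacc x hx⟩, List.elem_eq_true_of_mem hx⟩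
  have h1 := hsub.length_le
  have h2 := (List.length_eq_length_filter_add
      (l := ks.filter (fun k => !acc.contains k)) (fun k => fr.contains k)).symm
  have h3 : ks.filter (fun k => !(acc ++ fr).contains k)
      = (ks.filter (fun k => !acc.contains k)).filter (fun k => !fr.contains k) := by
    rw [List.filter_filter]
    apply List.filter_congr
    intro x _
    simp [Bool.not_or, Bool.and_comm]
  rw [h3]
  omega

lemma pvA_keyScan_eq (ks : List String) (v : String) (acc : List String) :
    pvA_keyScan ks v acc = acc ++ pvNew ks (fun n => PySem.Str.isIn n v) acc := by
  unfold pvA_keyScan pvNew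
  have hfun : (fun (acc : List String) (n : String) =>
        if PySem.Str.isIn n v && !acc.contains n then acc ++ [n] else acc)
      = (fun (acc : List String) (n : String) =>
        if PySem.Str.isIn n v = true then PySem.Set.add acc n else acc) := by
    funext a n
    rcases Bool.eq_false_or_eq_true (PySem.Str.isIn n v) with hb | hb <;> rw [hb] <;>
      by_cases hc : n ∈ a <;> simp [PySem.Set.add, hc]
  rw [hfun, PySem.List.foldl_if_eq_foldl_filter]
  have : (List.filter (fun n => PySem.Str.isIn n v) ks).foldl PySem.Set.add acc
      = PySem.Set.update acc (List.filter (fun n => PySem.Str.isIn n v) ks) := rfl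
  rw [this, PySem.Set.update_eq_append_filter]
  simp

lemma pvA_keyScan_G (ks : List String) (v : String) (acc : List String) :
    acc.length ≤ (pvA_keyScan ks v acc).length ∧
    pvF ks (pvA_keyScan ks v acc) + (pvA_keyScan ks v acc).length ≤ pvF ks acc + acc.length := by
  rw [pvA_keyScan_eq]
  have h := pvF_append ks acc (pvNew ks (fun n => PySem.Str.isIn n v) acc)
      (pvNew_nodup _ _ _) (fun x hx => (pvNew_mem' hx).1) (fun x hx => (pvNew_mem' hx).2.2)
  simp only [List.length_append]
  omega

lemma pvA_prodScan_G (ks : List String) (vs : List String) (acc : List String) :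
    acc.length ≤ (pvA_prodScan ks vs acc).length ∧
    pvF ks (pvA_prodScan ks vs acc) + (pvA_prodScan ks vs acc).length
      ≤ pvF ks acc + acc.length := by
  induction vs generalizing acc with
  | nil => simp [pvA_prodScan]
  | cons v vs ih =>
    have h0 : pvA_prodScan ks (v :: vs) acc = pvA_prodScan ks vs (pvA_keyScan ks v acc) := rfl
    have h1 := pvA_keyScan_G ks v acc
    have h2 := ih (pvA_keyScan ks v acc)
    rw [h0]
    omega

-- outer loop of A: for letter in accesible — the index walks the growing list
def pvA_loop (d : List (String × List String)) (i : Nat) (acc : List String) : List String :=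
  if h : i < acc.length then
    pvA_loop d (i + 1) (pvA_prodScan (pvKeys d) (pvProds d acc[i]) acc)
  else acc
termination_by pvF (pvKeys d) acc + acc.length - i
decreasing_by
  have h2 := pvA_prodScan_G (pvKeys d) (pvProds d acc[i]) acc
  omega

def delete_inaccesible (derivations : List (String × List String)) : List (String × List String) :=
  match pvKeys derivations with
  | [] => []        -- list(derivations.keys())[0] raises IndexError; excluded by Pre_
  | start :: _ =>
    let accesible := pvA_loop derivations 0 [start]
    -- deepcopy + `del derivations[key]` for keys not in accesible = keep exactly these items
    (PySem.Dict.ofList derivations).items.filter (fun kv => accesible.contains kv.1)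

-- ===== PORT B =====
-- Stage 1 of B: the adjacency dict adj = {x: [n for n in keys if any(n in v for v in derivations[x])]}
def pvEdges (d : List (String × List String)) (x : String) : List String :=
  (pvKeys d).filter (fun n => (pvProds d x).any (fun v => PySem.Str.isIn n v))

def pvAdj (d : List (String × List String)) : PySem.Dict String (List String) :=
  (pvKeys d).foldl (fun a x => a.insert x (pvEdges d x)) PySem.Dict.empty

-- ---- lookup facts about the adjacency dict (cited by the loop's decreasing_by chain) ----
lemma pvKeys_nodup (d : List (String × List String)) : (pvKeys d).Nodup :=
  PySem.Dict.nodup_keys_ofList d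

lemma pvAdj_items (d : List (String × List String)) :
    (pvAdj d).items = (pvKeys d).map (fun x => (x, pvEdges d x)) := by
  unfold pvAdj
  have h := PySem.Dict.items_foldl_insert_fresh (pvKeys d) (fun x => x) (pvEdges d)
    PySem.Dict.empty (fun a _ => PySem.Dict.contains_empty a) (by simpa using pvKeys_nodup d)
  simpa using h

lemma pvAdj_getD (d : List (String × List String)) (x : String) :
    (pvAdj d).getD x [] = if x ∈ pvKeys d then pvEdges d x else [] := by
  have hkeys : (pvAdj d).keys = pvKeys d := by
    have h0 : (pvAdj d).keys = (pvAdj d).items.map (·.1) := rfl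
    rw [h0, pvAdj_items, List.map_map]
    simp [Function.comp_def]
  have hnd : (pvAdj d).keys.Nodup := by
    rw [hkeys]; exact pvKeys_nodup d
  by_cases hx : x ∈ pvKeys d
  · rw [if_pos hx]
    refine PySem.Dict.getD_of_mem_items (pvAdj d) ?_ hnd []
    rw [pvAdj_items]
    exact List.mem_map_of_mem hx
  · rw [if_neg hx]
    refine PySem.Dict.getD_of_not_contains (pvAdj d) [] ?_
    rw [PySem.Dict.contains_eq_decide_mem_keys, hkeys]
    simpa using hx

lemma pvAdjGet_nodup (d : List (String × List String)) (x : String) :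
    ((pvAdj d).getD x []).Nodup := by
  rw [pvAdj_getD]
  split_ifs
  · exact (pvKeys_nodup d).filter _
  · exact List.nodup_nil

lemma pvAdjGet_mem {d : List (String × List String)} {x n : String}
    (h : n ∈ (pvAdj d).getD x []) :
    n ∈ pvKeys d ∧ (pvProds d x).any (fun v => PySem.Str.isIn n v) = true := by
  rw [pvAdj_getD] at h
  split_ifs at h with hx
  · exact List.mem_filter.mp h
  · simp at h

-- one body of B's inner `for x in keys` loop
def pvB_step (d : List (String × List String)) (st : List String × Bool) (x : String) :
    List String × Bool :=
  if st.1.contains x then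
    -- new = [n for n in adj[x] if n not in reachable]
    if (((pvAdj d).getD x []).filter (fun n => !st.1.contains n)).isEmpty then st
    else ((((pvAdj d).getD x []).filter (fun n => !st.1.contains n)).foldl PySem.Set.add st.1,
          true)
  else st

-- one full pass of B over the keys; state is (reachable, changed)
def pvB_passAux (d : List (String × List String)) (ks : List String)
    (st : List String × Bool) : List String × Bool :=
  ks.foldl (pvB_step d) st

-- ---- shape facts cited by pvB_loop's decreasing_by ----
lemma pvB_step_shape (d : List (String × List String)) (st : List String × Bool) (x : String) :
    ∃ nw : List String,
      pvB_step d st x = (st.1 ++ nw, st.2 || !nw.isEmpty) ∧ nw.Nodup ∧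
      (∀ n ∈ nw, n ∈ pvKeys d ∧ n ∉ st.1 ∧ x ∈ st.1 ∧ n ∈ (pvAdj d).getD x []) ∧
      (∀ n ∈ (pvAdj d).getD x [], x ∈ st.1 → n ∉ st.1 → n ∈ nw) := by
  unfold pvB_step
  by_cases hc : st.1.contains x
  · rw [if_pos hc]
    by_cases he : (((pvAdj d).getD x []).filter (fun n => !st.1.contains n)).isEmpty
    · refine ⟨[], by rw [if_pos he]; simp, List.nodup_nil, by simp, ?_⟩
      intro n hn _ hnst
      exfalso
      have : n ∈ ((pvAdj d).getD x []).filter (fun n => !st.1.contains n) :=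
        List.mem_filter.mpr ⟨hn, by simpa using hnst⟩
      rw [List.isEmpty_iff.mp he] at this
      simp at this
    · refine ⟨((pvAdj d).getD x []).filter (fun n => !st.1.contains n), ?_, ?_, ?_, ?_⟩
      · rw [if_neg he]
        have hupd : (((pvAdj d).getD x []).filter (fun n => !st.1.contains n)).foldl
            PySem.Set.add st.1
            = PySem.Set.update st.1 (((pvAdj d).getD x []).filter (fun n => !st.1.contains n)) :=
          rfl
        rw [hupd, PySem.Set.update_eq_append_of_disjoint _ _ ((pvAdjGet_nodup d x).filter _)
          (fun n hn => by simpa using (List.mem_filter.mp hn).2)]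
        have hee : (((pvAdj d).getD x []).filter (fun n => !st.1.contains n)).isEmpty = false :=
          Bool.eq_false_iff.mpr he
        rw [hee]
        simp
      · exact (pvAdjGet_nodup d x).filter _
      · intro n hn
        obtain ⟨h1, h2⟩ := List.mem_filter.mp hn
        exact ⟨(pvAdjGet_mem h1).1, by simpa using h2, by simpa using hc, h1⟩
      · intro n hn _ hnst
        exact List.mem_filter.mpr ⟨hn, by simpa using hnst⟩
  · rw [if_neg hc]
    refine ⟨[], by simp, List.nodup_nil, by simp, ?_⟩
    intro n _ hx _
    exact absurd (by simpa using hx : st.1.contains x = true) hc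

lemma pvB_pass_shape (d : List (String × List String)) (ks : List String) :
    ∀ st : List String × Bool, ∃ fr : List String,
      pvB_passAux d ks st = (st.1 ++ fr, st.2 || !fr.isEmpty) ∧ fr.Nodup ∧
      ∀ n ∈ fr, n ∈ pvKeys d ∧ n ∉ st.1 := by
  induction ks with
  | nil => exact fun st => ⟨[], by simp [pvB_passAux], List.nodup_nil, by simp⟩
  | cons x ks ih =>
    intro st
    have hstep : pvB_passAux d (x :: ks) st = pvB_passAux d ks (pvB_step d st x) := rfl
    obtain ⟨nw, heq1, hnd1, hmem1, -⟩ := pvB_step_shape d st x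
    obtain ⟨fr, heq2, hnd2, hmem2⟩ := ih (pvB_step d st x)
    refine ⟨nw ++ fr, ?_, ?_, ?_⟩
    · rw [hstep, heq2, heq1]
      have hiso : (nw ++ fr).isEmpty = (nw.isEmpty && fr.isEmpty) := by cases nw <;> simp
      simp only [List.append_assoc, hiso]
      congr 1
      cases hb : st.2 <;> cases hnw : nw.isEmpty <;> cases hfr : fr.isEmpty <;> simp
    · refine List.Nodup.append hnd1 hnd2 ?_
      intro a ha1 ha2
      have := (hmem2 a ha2).2
      rw [heq1] at this
      exact this (by simp [ha1])
    · intro n hn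
      rcases List.mem_append.mp hn with h1 | h2
      · exact ⟨(hmem1 n h1).1, (hmem1 n h1).2.1⟩
      · obtain ⟨hk, hnst⟩ := hmem2 n h2
        rw [heq1] at hnst
        exact ⟨hk, fun hns => hnst (by simp [hns])⟩

-- B's while loop: changed = False; one pass; repeat while changed
def pvB_loop (d : List (String × List String)) (reach : List String) : List String :=
  if _h : (pvB_passAux d (pvKeys d) (reach, false)).2 then
    pvB_loop d (pvB_passAux d (pvKeys d) (reach, false)).1
  else (pvB_passAux d (pvKeys d) (reach, false)).1
termination_by pvF (pvKeys d) reach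
decreasing_by
  obtain ⟨fr, heq, hnd, hmem⟩ := pvB_pass_shape d (pvKeys d) (reach, false)
  rw [heq] at _h ⊢
  simp only [Bool.false_or] at _h
  have hfr : fr ≠ [] := by
    intro hfr
    rw [hfr] at _h
    simp at _h
  have hF := pvF_append (pvKeys d) reach fr hnd
    (fun x hx => (hmem x hx).1) (fun x hx => (hmem x hx).2)
  have hlen : 0 < fr.length := List.length_pos_of_ne_nil hfr
  simp only
  omega

def delete_inaccesible_alt (derivations : List (String × List String)) :
    List (String × List String) :=
  match pvKeys derivations with
  | [] => []        -- keys[0] raises IndexError; excluded by Pre_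
  | start :: _ =>
    let reachable := pvB_loop derivations [start]
    -- for key in keys: if key not in reachable: del derivations[key]
    (PySem.Dict.ofList derivations).items.filter (fun kv => reachable.contains kv.1)

-- ===== PRECONDITION & SPEC =====
-- Pre_ excludes only the empty dict, on which the Python A raises IndexError at
-- list(derivations.keys())[0] (B raises the same way at keys[0]).
def Pre_delete_inaccesible (derivations : List (String × List String)) : Prop :=
  derivations ≠ []
instance (derivations : List (String × List String)) : Decidable (Pre_delete_inaccesible derivations) := by unfold Pre_delete_inaccesible; infer_instance

def pvWitness_delete_inaccesible : (List (String × List String)) :=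
  [("S", ["a S", "A"]), ("A", ["b"]), ("B", ["c S"])]

def Spec_delete_inaccesible (derivations : List (String × List String)) (out : List (String × List String)) : Prop := out = delete_inaccesible_alt derivations
instance (derivations : List (String × List String)) (out : List (String × List String)) : Decidable (Spec_delete_inaccesible derivations out) := by unfold Spec_delete_inaccesible; infer_instance

-- ===== CLAIM (what is proved, stated in full; the proofs are below) =====
def Claim_equal_delete_inaccesible : Prop := ∀ (derivations : List (String × List String)), Dom_delete_inaccesible derivations → Pre_delete_inaccesible derivations → Spec_delete_inaccesible derivations (delete_inaccesible derivations)

-- ===== LEMMAS AND PROOFS =====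

-- the reachability step both programs test: n occurs as a substring of a production of x
def pvAnyP (d : List (String × List String)) (x n : String) : Bool :=
  (pvProds d x).any (fun v => PySem.Str.isIn n v)

def pvClosed (d : List (String × List String)) (ks : List String) (S : List String) : Prop :=
  ∀ x ∈ S, ∀ n ∈ ks, pvAnyP d x n = true → n ∈ S

lemma pvNew_complete {ks : List String} {p : String → Bool} {acc : List String} {x : String}
    (h1 : x ∈ ks) (h2 : p x = true) (h3 : x ∉ acc) : x ∈ pvNew ks p acc := by
  unfold pvNew
  simp only [List.mem_filter, PySem.Set.mem_ofList]
  exact ⟨⟨h1, h2⟩, by simpa using h3⟩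

-- ---- A-side membership facts ----
lemma pvA_keyScan_prefix (ks : List String) (v : String) (acc : List String) :
    acc <+: pvA_keyScan ks v acc := by
  rw [pvA_keyScan_eq]; exact List.prefix_append _ _

lemma pvA_keyScan_sound {ks : List String} {v : String} {acc : List String} {x : String}
    (hx : x ∈ pvA_keyScan ks v acc) :
    x ∈ acc ∨ (x ∈ ks ∧ PySem.Str.isIn x v = true) := by
  rw [pvA_keyScan_eq] at hx
  rcases List.mem_append.mp hx with h | h
  · exact Or.inl h
  · obtain ⟨h1, h2, _⟩ := pvNew_mem' h
    exact Or.inr ⟨h1, h2⟩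

lemma pvA_keyScan_complete {ks : List String} {v : String} {acc : List String} {x : String}
    (h1 : x ∈ ks) (h2 : PySem.Str.isIn x v = true) : x ∈ pvA_keyScan ks v acc := by
  rw [pvA_keyScan_eq]
  by_cases h3 : x ∈ acc
  · exact List.mem_append.mpr (Or.inl h3)
  · exact List.mem_append.mpr (Or.inr (pvNew_complete h1 h2 h3))

lemma pvA_prodScan_prefix (ks : List String) (vs : List String) (acc : List String) :
    acc <+: pvA_prodScan ks vs acc := by
  induction vs generalizing acc with
  | nil => simp [pvA_prodScan]
  | cons v vs ih =>
    have h0 : pvA_prodScan ks (v :: vs) acc = pvA_prodScan ks vs (pvA_keyScan ks v acc) := rfl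
    rw [h0]
    exact (pvA_keyScan_prefix ks v acc).trans (ih _)

lemma pvA_prodScan_sound {ks : List String} {vs : List String} {acc : List String} {x : String}
    (hx : x ∈ pvA_prodScan ks vs acc) :
    x ∈ acc ∨ (x ∈ ks ∧ ∃ v ∈ vs, PySem.Str.isIn x v = true) := by
  induction vs generalizing acc with
  | nil => exact Or.inl (by simpa [pvA_prodScan] using hx)
  | cons v vs ih =>
    have h0 : pvA_prodScan ks (v :: vs) acc = pvA_prodScan ks vs (pvA_keyScan ks v acc) := rfl
    rw [h0] at hx
    rcases ih hx with h | ⟨h1, w, hw, hIn⟩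
    · rcases pvA_keyScan_sound h with h' | ⟨h1, h2⟩
      · exact Or.inl h'
      · exact Or.inr ⟨h1, v, by simp, h2⟩
    · exact Or.inr ⟨h1, w, by simp [hw], hIn⟩

lemma pvA_prodScan_complete {ks : List String} {vs : List String} {acc : List String}
    {x v : String} (hv : v ∈ vs) (h1 : x ∈ ks) (h2 : PySem.Str.isIn x v = true) :
    x ∈ pvA_prodScan ks vs acc := by
  induction vs generalizing acc with
  | nil => simp at hv
  | cons w vs ih =>
    have h0 : pvA_prodScan ks (w :: vs) acc = pvA_prodScan ks vs (pvA_keyScan ks w acc) := rfl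
    rw [h0]
    rcases List.mem_cons.mp hv with rfl | hv'
    · exact (pvA_prodScan_prefix ks vs _).subset (pvA_keyScan_complete h1 h2)
    · exact ih hv'

-- ---- A-loop facts (functional induction over pvA_loop) ----
lemma pvA_loop_prefix (d : List (String × List String)) (i : Nat) (acc : List String) :
    acc <+: pvA_loop d i acc := by
  induction i, acc using pvA_loop.induct d with
  | case1 i acc h ih =>
    rw [pvA_loop, dif_pos h]
    exact (pvA_prodScan_prefix _ _ _).trans ih
  | case2 i acc h =>
    rw [pvA_loop, dif_neg h]

lemma pvA_loop_sound (d : List (String × List String)) (S : List String)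
    (hS : pvClosed d (pvKeys d) S) (i : Nat) (acc : List String) :
    (∀ x ∈ acc, x ∈ S) → ∀ x ∈ pvA_loop d i acc, x ∈ S := by
  induction i, acc using pvA_loop.induct d with
  | case1 i acc h ih =>
    intro hacc
    rw [pvA_loop, dif_pos h]
    apply ih
    intro x hx
    rcases pvA_prodScan_sound hx with h' | ⟨h1, v, hv, hIn⟩
    · exact hacc x h'
    · refine hS (acc[i]) (hacc _ (List.getElem_mem h)) x h1 ?_
      exact List.any_eq_true.mpr ⟨v, hv, hIn⟩
  | case2 i acc h =>
    intro hacc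
    rw [pvA_loop, dif_neg h]
    exact hacc

lemma pvA_loop_closed (d : List (String × List String)) (i : Nat) (acc : List String) :
    (∀ (j : Nat), j < i → ∀ (hj2 : j < acc.length),
      ∀ n ∈ pvKeys d, pvAnyP d acc[j] n = true → n ∈ acc) →
    pvClosed d (pvKeys d) (pvA_loop d i acc) := by
  induction i, acc using pvA_loop.induct d with
  | case1 i acc h ih =>
    intro hinv
    rw [pvA_loop, dif_pos h]
    apply ih
    intro j hj hj2 n hn hp
    have hpre := pvA_prodScan_prefix (pvKeys d) (pvProds d acc[i]) acc
    have hj2' : j < acc.length := lt_of_le_of_lt (Nat.lt_succ_iff.mp hj) h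
    have hgj : (pvA_prodScan (pvKeys d) (pvProds d acc[i]) acc)[j]'hj2 = acc[j]'hj2' :=
      (List.IsPrefix.getElem hpre hj2').symm
    rw [hgj] at hp
    rcases Nat.lt_succ_iff_lt_or_eq.mp hj with hj' | rfl
    · exact hpre.subset (hinv j hj' hj2' n hn hp)
    · unfold pvAnyP at hp
      obtain ⟨v, hv, hIn⟩ := List.any_eq_true.mp hp
      exact pvA_prodScan_complete hv hn hIn
  | case2 i acc h =>
    intro hinv
    rw [pvA_loop, dif_neg h]
    intro x hx n hn hp
    obtain ⟨j, hj, rfl⟩ := List.mem_iff_getElem.mp hx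
    exact hinv j (lt_of_lt_of_le hj (Nat.le_of_not_lt h)) hj n hn hp

-- ---- B-side facts ----
lemma pvAdjGet_complete {d : List (String × List String)} {x n : String}
    (hx : x ∈ pvKeys d) (hn : n ∈ pvKeys d) (hp : pvAnyP d x n = true) :
    n ∈ (pvAdj d).getD x [] := by
  rw [pvAdj_getD, if_pos hx]
  exact List.mem_filter.mpr ⟨hn, hp⟩

-- a pass only adds elements of any closed superset of the current reachable set
lemma pvB_pass_sound (d : List (String × List String)) (ks : List String) (S : List String)
    (hS : pvClosed d (pvKeys d) S) :
    ∀ st : List String × Bool, (∀ y ∈ st.1, y ∈ S) →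
      ∀ n ∈ (pvB_passAux d ks st).1, n ∈ S := by
  induction ks with
  | nil => exact fun st h => by simpa [pvB_passAux] using h
  | cons x ks ih =>
    intro st hst
    have hstep : pvB_passAux d (x :: ks) st = pvB_passAux d ks (pvB_step d st x) := rfl
    rw [hstep]
    refine ih (pvB_step d st x) ?_
    obtain ⟨nw, heq, -, hmem, -⟩ := pvB_step_shape d st x
    rw [heq]
    intro y hy
    rcases List.mem_append.mp hy with h1 | h2
    · exact hst y h1
    · obtain ⟨hk, -, hxst, hget⟩ := hmem y h2
      exact hS x (hst x hxst) y hk (pvAdjGet_mem hget).2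

-- a pass reporting changed = false changed nothing and witnesses closure along ks
lemma pvB_pass_false (d : List (String × List String)) (ks : List String) :
    ∀ st : List String × Bool, (pvB_passAux d ks st).2 = false →
      (pvB_passAux d ks st).1 = st.1 ∧
      ∀ x ∈ ks, x ∈ st.1 → ∀ n ∈ (pvAdj d).getD x [], n ∈ st.1 := by
  induction ks with
  | nil => intro st _; exact ⟨rfl, by simp⟩
  | cons x ks ih =>
    intro st h
    have hstep : pvB_passAux d (x :: ks) st = pvB_passAux d ks (pvB_step d st x) := rfl
    rw [hstep] at h ⊢
    obtain ⟨nw, heqs, -, -, hcompl⟩ := pvB_step_shape d st x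
    have hb : (pvB_step d st x).2 = false := by
      obtain ⟨fr, heqp, -, -⟩ := pvB_pass_shape d ks (pvB_step d st x)
      rw [heqp] at h
      simp only at h
      cases hv : (pvB_step d st x).2
      · rfl
      · rw [hv] at h; simp at h
    have hnw : nw = [] := by
      rw [heqs] at hb
      simp only at hb
      cases hnw : nw.isEmpty
      · rw [hnw] at hb; simp at hb
      · exact List.isEmpty_iff.mp hnw
    have hst : pvB_step d st x = st := by
      rw [heqs, hnw]
      simp
    rw [hst] at h ⊢
    obtain ⟨h1, h2⟩ := ih st h
    refine ⟨h1, ?_⟩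
    intro y hy hyst n hn
    rcases List.mem_cons.mp hy with rfl | hy'
    · by_contra hnst
      have := hcompl n hn hyst hnst
      rw [hnw] at this
      simp at this
    · exact h2 y hy' hyst n hn

-- ---- B-loop facts (functional induction over pvB_loop) ----
lemma pvB_loop_mono (d : List (String × List String)) :
    ∀ reach : List String, ∀ x ∈ reach, x ∈ pvB_loop d reach := by
  intro reach
  induction reach using pvB_loop.induct d with
  | case1 reach h ih =>
    rw [pvB_loop, dif_pos h]
    intro x hx
    apply ih
    obtain ⟨fr, heq, -, -⟩ := pvB_pass_shape d (pvKeys d) (reach, false)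
    rw [heq]
    exact List.mem_append.mpr (Or.inl hx)
  | case2 reach h =>
    rw [pvB_loop, dif_neg h]
    intro x hx
    obtain ⟨fr, heq, -, -⟩ := pvB_pass_shape d (pvKeys d) (reach, false)
    rw [heq]
    exact List.mem_append.mpr (Or.inl hx)

lemma pvB_loop_sound (d : List (String × List String)) (S : List String)
    (hS : pvClosed d (pvKeys d) S) :
    ∀ reach : List String, (∀ y ∈ reach, y ∈ S) → ∀ n ∈ pvB_loop d reach, n ∈ S := by
  intro reach
  induction reach using pvB_loop.induct d with
  | case1 reach h ih =>
    intro hr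
    rw [pvB_loop, dif_pos h]
    exact ih (pvB_pass_sound d (pvKeys d) S hS (reach, false) hr)
  | case2 reach h =>
    intro hr
    rw [pvB_loop, dif_neg h]
    exact pvB_pass_sound d (pvKeys d) S hS (reach, false) hr

lemma pvB_loop_closed (d : List (String × List String)) :
    ∀ reach : List String, (∀ x ∈ reach, x ∈ pvKeys d) →
      pvClosed d (pvKeys d) (pvB_loop d reach) := by
  intro reach
  induction reach using pvB_loop.induct d with
  | case1 reach h ih =>
    intro hsub
    rw [pvB_loop, dif_pos h]
    apply ih
    obtain ⟨fr, heq, -, hmem⟩ := pvB_pass_shape d (pvKeys d) (reach, false)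
    rw [heq]
    intro x hx
    rcases List.mem_append.mp hx with h1 | h2
    · exact hsub x h1
    · exact (hmem x h2).1
  | case2 reach h =>
    intro hsub
    rw [pvB_loop, dif_neg h]
    obtain ⟨h1, h2⟩ := pvB_pass_false d (pvKeys d) (reach, false) (by simpa using h)
    rw [h1]
    intro x hx n hn hp
    exact h2 x (hsub x hx) hx n (pvAdjGet_complete (hsub x hx) hn hp)

-- contains respects extensional membership
lemma pvContains_congr (l1 l2 : List String) (x : String) (h : x ∈ l1 ↔ x ∈ l2) :
    l1.contains x = l2.contains x := by
  by_cases hx : x ∈ l1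
  · have hx2 := h.mp hx
    simp [hx, hx2]
  · have hx2 : x ∉ l2 := fun hh => hx (h.mpr hh)
    simp [hx, hx2]

-- the two reachability computations agree extensionally
lemma pvMain_mem (d : List (String × List String)) (start : String) (rest : List String)
    (hk : pvKeys d = start :: rest) :
    ∀ x, x ∈ pvA_loop d 0 [start] ↔ x ∈ pvB_loop d [start] := by
  have hstart : start ∈ pvKeys d := by rw [hk]; simp
  have hclB : pvClosed d (pvKeys d) (pvB_loop d [start]) :=
    pvB_loop_closed d [start] (by simpa using hstart)
  have hclA : pvClosed d (pvKeys d) (pvA_loop d 0 [start]) :=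
    pvA_loop_closed d 0 [start] (by intro j hj; omega)
  have hstartB : start ∈ pvB_loop d [start] :=
    pvB_loop_mono d [start] start (by simp)
  have hstartA : start ∈ pvA_loop d 0 [start] :=
    (pvA_loop_prefix d 0 [start]).subset (by simp)
  intro x
  constructor
  · intro hx
    refine pvA_loop_sound d _ hclB 0 [start] ?_ x hx
    intro y hy
    rw [List.mem_singleton.mp hy]
    exact hstartB
  · intro hx
    refine pvB_loop_sound d _ hclA [start] ?_ x hx
    intro y hy
    rw [List.mem_singleton.mp hy]
    exact hstartA

-- ===== VERDICT (by name: the statement is the Claim_ definition above) =====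
theorem delete_inaccesible_spec : Claim_equal_delete_inaccesible := by
  intro d _ _
  unfold Spec_delete_inaccesible delete_inaccesible delete_inaccesible_alt
  cases hk : pvKeys d with
  | nil => rfl
  | cons start rest =>
    apply List.filter_congr
    intro kv _
    exact pvContains_congr _ _ kv.1 (pvMain_mem d start rest hk kv.1)
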